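-- pv_equiv track=rewrite | github.com/didierdelpeyrou-stack/chatbotfelias | app.py | _extract_structure_hint
-- ===== SOURCE A (Python) =====
-- def _extract_structure_hint(user_context: dict) -> str:
--     """Extrait un libellé de structure/centre depuis le contexte pré-chat."""
--     if not isinstance(user_context, dict):
--         return ""
--     for key in ("structure", "nom_structure", "centre", "association", "organisme", "employeur"):
--         for k, v in user_context.items():
--             if isinstance(k, str) and isinstance(v, str) and key in k.lower() and v.strip():
--                 return v.strip()[:120]
--     return ""
-- ===== SOURCE B (Python) =====
-- def _extract_structure_hint(user_context: dict) -> str: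
--     """Extrait un libellé de structure/centre depuis le contexte pré-chat."""
--     if not isinstance(user_context, dict):
--         return ""
--     labels = ("structure", "nom_structure", "centre", "association", "organisme", "employeur")
--     best_rank = len(labels)
--     best = None
--     # one pass over the items: keep the value with the smallest priority rank,
--     # updating only on strictly smaller rank so the earliest dict item wins ties
--     for k, v in user_context.items():
--         if isinstance(k, str) and isinstance(v, str) and v.strip():
--             kl = k.lower()
--             for i, lab in enumerate(labels):
--                 if lab in kl:
--                     if i < best_rank:
--                         best_rank = i
--                         best = v
--                     break
--     return best.strip()[:120] if best is not None else ""
-- ===== Notes on version B (the rewrite author's own statement) =====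
-- stated objective: alternative
-- what changed: Replaces A's priority-outer/items-inner nested scan (up to 6 passes over the dict) with a single pass over the items that computes each key's priority rank and keeps the first item of minimal rank.
import Mathlib
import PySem

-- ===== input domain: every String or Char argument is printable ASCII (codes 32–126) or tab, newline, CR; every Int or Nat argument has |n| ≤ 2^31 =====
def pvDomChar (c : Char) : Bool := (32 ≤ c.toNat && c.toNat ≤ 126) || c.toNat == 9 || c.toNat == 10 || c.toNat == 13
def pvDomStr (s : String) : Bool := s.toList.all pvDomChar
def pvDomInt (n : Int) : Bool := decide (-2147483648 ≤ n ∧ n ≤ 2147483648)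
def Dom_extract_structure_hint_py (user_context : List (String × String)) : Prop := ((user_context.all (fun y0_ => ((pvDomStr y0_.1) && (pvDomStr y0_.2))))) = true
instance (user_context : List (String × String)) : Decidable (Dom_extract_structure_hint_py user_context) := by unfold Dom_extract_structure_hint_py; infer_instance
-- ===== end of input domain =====

-- B replaces A's label-outer/items-inner nested scan by one pass over the items keeping the
-- first item of minimal priority rank (objective: alternative decomposition, same result).
-- the priority-label tuple from the Python source (shared data literal of both ports)
def pvLabels : List String := ["structure", "nom_structure", "centre", "association", "organisme", "employeur"]

-- ===== PORT A =====
-- inner loop of A: first item whose lowered key contains `lab` and whose value strips nonempty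
def pvInnerA (lab : String) : List (String × String) → Option String
  | [] => none
  | (k, v) :: rest =>
    if PySem.Str.isIn lab (PySem.Str.lower k) && !(PySem.Str.strip v == "") then some v
    else pvInnerA lab rest

-- outer loop of A over the priority labels (the `return` escapes both loops → Option)
def pvOuterA : List String → List (String × String) → Option String
  | [], _ => none
  | lab :: rest, items =>
    match pvInnerA lab items with
    | some v => some v
    | none => pvOuterA rest items

def extract_structure_hint_py (user_context : List (String × String)) : String :=
  match pvOuterA pvLabels user_context with
  | some v => PySem.Str.slice (PySem.Str.strip v) none (some 120)
  | none => ""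

-- ===== PORT B =====
-- rank of a lowered key: index of the first priority label it contains (enumerate + break)
def pvRankB (kl : String) : List String → Nat → Option Nat
  | [], _ => none
  | lab :: rest, i => if PySem.Str.isIn lab kl then some i else pvRankB kl rest (i + 1)

-- single pass over the items, keeping the best (minimal-rank, earliest) candidate value
def pvBestB : List (String × String) → Nat → Option String → Option String
  | [], _, best => best
  | (k, v) :: rest, bestRank, best =>
    if PySem.Str.strip v == "" then pvBestB rest bestRank best
    else
      match pvRankB (PySem.Str.lower k) pvLabels 0 with
      | none => pvBestB rest bestRank best
      | some i =>
        if i < bestRank then pvBestB rest i (some v) else pvBestB rest bestRank best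

def extract_structure_hint_py_alt (user_context : List (String × String)) : String :=
  match pvBestB user_context pvLabels.length none with
  | some v => PySem.Str.slice (PySem.Str.strip v) none (some 120)
  | none => ""

-- ===== PRECONDITION & SPEC =====
def Spec_extract_structure_hint_py (user_context : List (String × String)) (out : String) : Prop := out = extract_structure_hint_py_alt user_context
instance (user_context : List (String × String)) (out : String) : Decidable (Spec_extract_structure_hint_py user_context out) := by unfold Spec_extract_structure_hint_py; infer_instance

-- ===== CLAIM (what is proved, stated in full; the proofs are below) =====
def Claim_equal_extract_structure_hint_py : Prop := ∀ (user_context : List (String × String)), Dom_extract_structure_hint_py user_context → Spec_extract_structure_hint_py user_context (extract_structure_hint_py user_context)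

-- ===== LEMMAS AND PROOFS =====

-- reference: first item of minimal rank, ranks taken over label list `ls` starting at index
-- `i0`, considering only ranks < `bound` (later items win only on strictly smaller rank)
def pvG (ls : List String) (i0 bound : Nat) : List (String × String) → Option String
  | [] => none
  | (k, v) :: rest =>
    if PySem.Str.strip v == "" then pvG ls i0 bound rest
    else
      match pvRankB (PySem.Str.lower k) ls i0 with
      | none => pvG ls i0 bound rest
      | some i =>
        if i < bound then
          match pvG ls i0 i rest with
          | some w => some w
          | none => some v
        else pvG ls i0 bound rest

theorem pvRankB_ge (kl : String) (ls : List String) (i0 i : Nat)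
    (h : pvRankB kl ls i0 = some i) : i0 ≤ i := by
  induction ls generalizing i0 with
  | nil => simp [pvRankB] at h
  | cons lab rest ih =>
    simp only [pvRankB] at h
    split at h
    · simp at h; omega
    · have := ih (i0 + 1) h; omega

theorem pvG_none_of_le (ls : List String) (i0 bound : Nat) (items : List (String × String))
    (h : bound ≤ i0) : pvG ls i0 bound items = none := by
  induction items with
  | nil => rfl
  | cons p rest ih =>
    obtain ⟨k, v⟩ := p
    simp only [pvG]
    split
    · exact ih
    · cases hr : pvRankB (PySem.Str.lower k) ls i0 with
      | none => exact ih
      | some i =>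
        have hile : i0 ≤ i := pvRankB_ge _ _ _ _ hr
        have hni : ¬ i < bound := by omega
        simpa [hni] using ih

theorem pvG_nil_labels (i0 bound : Nat) (items : List (String × String)) :
    pvG [] i0 bound items = none := by
  induction items with
  | nil => rfl
  | cons p rest ih =>
    obtain ⟨k, v⟩ := p
    simp only [pvG, pvRankB]
    split <;> exact ih

theorem pvG_step (lab : String) (ls : List String) (i0 : Nat)
    (items : List (String × String)) :
    ∀ bound, i0 < bound →
      pvG (lab :: ls) i0 bound items =
        match pvInnerA lab items with
        | some v => some v
        | none => pvG ls (i0 + 1) bound items := by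
  induction items with
  | nil => intro bound _; rfl
  | cons p rest ih =>
    intro bound hb
    obtain ⟨k, v⟩ := p
    by_cases hv : PySem.Str.strip v = ""
    · simp only [pvG, pvInnerA, hv]
      simpa using ih bound hb
    · by_cases hin : PySem.Str.isIn lab (PySem.Str.lower k) = true
      · simp only [pvG, pvInnerA, pvRankB, hin]
        simp [hb, hv, pvG_none_of_le (lab :: ls) i0 i0 rest le_rfl]
      · have hin' : PySem.Str.isIn lab (PySem.Str.lower k) = false := by
          revert hin; cases PySem.Str.isIn lab (PySem.Str.lower k) <;> simp
        simp only [pvG, pvInnerA, pvRankB, hin']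
        cases hr : pvRankB (PySem.Str.lower k) ls (i0 + 1) with
        | none => simpa [hv] using ih bound hb
        | some i =>
          have hi0 : i0 < i := by have := pvRankB_ge _ _ _ _ hr; omega
          by_cases hib : i < bound
          · cases h' : pvInnerA lab rest <;>
              simp [hv, hib, h', ih i hi0]
          · cases h' : pvInnerA lab rest <;>
              simp [hv, hib, h', ih bound hb]

theorem pvOuterA_eq_pvG (ls : List String) (items : List (String × String)) :
    ∀ i0, pvOuterA ls items = pvG ls i0 (i0 + ls.length) items := by
  induction ls with
  | nil => intro i0; simp [pvOuterA, pvG_nil_labels]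
  | cons lab rest ih =>
    intro i0
    have hstep := pvG_step lab rest i0 items (i0 + (lab :: rest).length) (by simp)
    rw [hstep]
    have : i0 + (lab :: rest).length = (i0 + 1) + rest.length := by simp; omega
    rw [this, ← ih (i0 + 1)]
    rfl

theorem pvBestB_eq_pvG (items : List (String × String)) :
    ∀ bound best, pvBestB items bound best =
      match pvG pvLabels 0 bound items with
      | some v => some v
      | none => best := by
  induction items with
  | nil => intro bound best; rfl
  | cons p rest ih =>
    intro bound best
    obtain ⟨k, v⟩ := p
    simp only [pvBestB, pvG]
    split
    · exact ih bound best
    · cases pvRankB (PySem.Str.lower k) pvLabels 0 with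
      | none => exact ih bound best
      | some i =>
        by_cases hib : i < bound
        · simp only [if_pos hib, ih i (some v)]
          cases pvG pvLabels 0 i rest <;> simp
        · simp only [if_neg hib]
          exact ih bound best

-- ===== VERDICT (by name: the statement is the Claim_ definition above) =====
theorem extract_structure_hint_py_spec : Claim_equal_extract_structure_hint_py := by
  intro uc _
  unfold Spec_extract_structure_hint_py extract_structure_hint_py extract_structure_hint_py_alt
  rw [pvBestB_eq_pvG uc pvLabels.length none,
    pvOuterA_eq_pvG pvLabels uc 0, Nat.zero_add]
  cases pvG pvLabels 0 pvLabels.length uc <;> simp
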